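-- pv_equiv track=rewrite | github.com/BeNewt/First-Repo | cheatsheet.py | findNeedle
-- ===== SOURCE A (Python) =====
-- def findNeedle(needle, hayStack):
--     hayStack = hayStack.strip().lower()
--     needle = needle.lower()
--     psn = hayStack.find(needle)
--
--     while (psn >= 0):
--         before = " "
--         after = " "
--         if psn > 0:
--             before = hayStack[psn - 1: psn]
--         if psn + len(needle) < len(hayStack):
--             after = hayStack[psn + len(needle): psn + len(needle) + 1]
--
--         if (before < 'a' or before > 'z') and (after < 'a'  or after > 'z'):
--             return True
--         psn = hayStack.find(needle, psn + 1);
--     return False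
-- ===== SOURCE B (Python) =====
-- def findNeedle(needle, hayStack):
--     h = hayStack.strip().lower()
--     n = needle.lower()
--     m = len(n)
--     # Dual traversal: instead of iterating over occurrences of the needle and
--     # filtering by boundaries (A), build the list of word-start candidates from
--     # the character classes of the haystack (position 0 and every position right
--     # after a non-letter character), then test only those positions for a match
--     # and a non-letter right boundary.  The left-boundary check disappears: it
--     # holds by construction of the candidate list.
--     starts = [0] + [i + 1 for i, c in enumerate(h) if not ('a' <= c <= 'z')]
--     for i in starts:
--         if h.startswith(n, i) and (i + m >= len(h) or not ('a' <= h[i + m] <= 'z')):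
--             return True
--     return False
-- ===== Notes on version B (the rewrite author's own statement) =====
-- stated objective: alternative
-- what changed: A iterates over occurrences of the needle (repeated str.find with retry) and filters each by inspecting both neighbour characters; B inverts the traversal: one pass over the haystack's character classes builds the list of word-start candidates (position 0 and each position after a non-letter), and only those candidates are tested with startswith plus a right-boundary check - the left-boundary inspection disappears by construction.
import Mathlib
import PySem

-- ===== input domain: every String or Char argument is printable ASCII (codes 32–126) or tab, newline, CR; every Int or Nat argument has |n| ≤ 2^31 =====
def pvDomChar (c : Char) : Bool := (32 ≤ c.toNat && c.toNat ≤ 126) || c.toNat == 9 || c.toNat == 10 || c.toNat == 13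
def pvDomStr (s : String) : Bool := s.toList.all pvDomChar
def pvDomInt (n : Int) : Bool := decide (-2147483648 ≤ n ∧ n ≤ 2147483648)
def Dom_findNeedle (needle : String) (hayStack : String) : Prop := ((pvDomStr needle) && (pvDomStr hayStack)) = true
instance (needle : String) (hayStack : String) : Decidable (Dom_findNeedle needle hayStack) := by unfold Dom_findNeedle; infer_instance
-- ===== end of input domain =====

-- B inverts A's traversal: A iterates over occurrences of the needle (find + retry) and
-- inspects both neighbour characters; B builds the word-start candidate list from the
-- haystack's character classes (0 and every position after a non-letter) and tests only
-- those with startswith plus a right-boundary check; objective: alternative (same cost).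

-- ===== PORT A =====
-- the boundary test A applies to the one-character strings `before`/`after` (Python's str `<` is `<` on List Char)
def pvTest (l : List Char) : Bool := decide (l < ['a']) || decide (['z'] < l)

-- the body of A's while loop: before/after slices and the boundary test
def pvCondA (h n : List Char) (psn : Int) : Bool :=
  pvTest (if 0 < psn then PySem.List.slice h (some (psn - 1)) (some psn) else [' ']) &&
  pvTest (if psn + (n.length : Int) < (h.length : Int) then
      PySem.List.slice h (some (psn + (n.length : Int))) (some (psn + (n.length : Int) + 1))
    else [' '])

-- A's while loop; fuel is only the termination device (h.length + 1 always suffices)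
def pvLoopA (h n : List Char) : Nat → Int → Bool
  | 0, _ => false
  | fuel + 1, psn =>
    if 0 ≤ psn then
      if pvCondA h n psn then true
      else pvLoopA h n fuel (PySem.Chars.findFrom h n (psn + 1) none)
    else false

def findNeedle (needle : String) (hayStack : String) : Bool :=
  let h := PySem.Chars.lower (PySem.Chars.strip hayStack.toList)
  let n := PySem.Chars.lower needle.toList
  pvLoopA h n (h.length + 1) (PySem.Chars.find h n)

-- ===== PORT B =====
-- Source B's right-boundary test `i + m >= len(h) or not ('a' <= h[i + m] <= 'z')`
def pvRightB (h : List Char) (m i : Int) : Bool :=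
  decide ((h.length : Int) ≤ i + m) ||
  !(decide ('a' ≤ PySem.List.pyGetD h (i + m) ' ') &&
    decide (PySem.List.pyGetD h (i + m) ' ' ≤ 'z'))

def findNeedle_alt (needle : String) (hayStack : String) : Bool :=
  let h := PySem.Chars.lower (PySem.Chars.strip hayStack.toList)
  let n := PySem.Chars.lower needle.toList
  -- `[0] + [i + 1 for i, c in enumerate(h) if not ('a' <= c <= 'z')]`
  let starts : List Int := 0 :: ((PySem.List.enumerate h).filterMap fun p =>
    if !(decide ('a' ≤ p.2) && decide (p.2 ≤ 'z')) then some (p.1 + 1) else none)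
  -- `h.startswith(n, i)` = `n` is a prefix of `h[i:]` (every candidate i is ≥ 0)
  starts.any fun i =>
    PySem.Chars.startswith (h.drop i.toNat) n && pvRightB h (n.length : Int) i

-- ===== PRECONDITION & SPEC =====
def Spec_findNeedle (needle : String) (hayStack : String) (out : Bool) : Prop := out = findNeedle_alt needle hayStack
instance (needle : String) (hayStack : String) (out : Bool) : Decidable (Spec_findNeedle needle hayStack out) := by unfold Spec_findNeedle; infer_instance

-- ===== CLAIM (what is proved, stated in full; the proofs are below) =====
def Claim_equal_findNeedle : Prop := ∀ (needle : String) (hayStack : String), Dom_findNeedle needle hayStack → Spec_findNeedle needle hayStack (findNeedle needle hayStack)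

-- ===== LEMMAS AND PROOFS =====

-- a "good" position i: word boundaries on both sides of a match of length m starting at i
def pvOk (h : List Char) (m i : Nat) : Prop :=
  (i = 0 ∨ ¬('a' ≤ h.getD (i - 1) ' ' ∧ h.getD (i - 1) ' ' ≤ 'z')) ∧
  (h.length ≤ i + m ∨ ¬('a' ≤ h.getD (i + m) ' ' ∧ h.getD (i + m) ' ' ≤ 'z'))

-- the common characterisation both programs are reduced to: a good match at some i ≥ start
def pvE (h n : List Char) (start : Nat) : Prop :=
  ∃ i : Nat, start ≤ i ∧ i + n.length ≤ h.length ∧ n <+: h.drop i ∧ pvOk h n.length i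

theorem pvCharTri (c : Char) : ('a' ≤ c → 'z' < c) ↔ (c < 'a' ∨ 'z' < c) := by
  constructor
  · intro hc
    rcases le_or_gt 'a' c with h1 | h1
    · exact Or.inr (hc h1)
    · exact Or.inl h1
  · rintro (h1 | h1) h2
    · exact absurd h2 (not_le.mpr h1)
    · exact h1

theorem pvRightB_iff (h : List Char) (m i : Nat) :
    pvRightB h (m : Int) (i : Int) = true ↔
      (h.length ≤ i + m ∨ ¬('a' ≤ h.getD (i + m) ' ' ∧ h.getD (i + m) ' ' ≤ 'z')) := by
  have e3 : ((i : Int) + (m : Int)).toNat = i + m := by omega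
  have e4 : (((h.length : Int)) ≤ (i : Int) + (m : Int)) ↔ h.length ≤ i + m := by omega
  unfold pvRightB
  rw [PySem.List.pyGetD_of_nonneg h (i := (i : Int) + (m : Int)) ' ' (by positivity), e3]
  simp [e4, not_and, not_le, pvCharTri]

-- the candidate list of B holds exactly the left-boundary-good positions (all ≥ 0)
theorem pvNL (c : Char) : (!(decide ('a' ≤ c) && decide (c ≤ 'z'))) = true ↔ ¬('a' ≤ c ∧ c ≤ 'z') := by
  simp [not_and, not_le, pvCharTri]

theorem pvMem_starts (h : List Char) (i : Int) :
    i ∈ (0 :: ((PySem.List.enumerate h).filterMap fun p =>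
        if !(decide ('a' ≤ p.2) && decide (p.2 ≤ 'z')) then some (p.1 + 1) else none)) ↔
      i = 0 ∨ ∃ k : Nat, k < h.length ∧ ¬('a' ≤ h.getD k ' ' ∧ h.getD k ' ' ≤ 'z') ∧ i = (k : Int) + 1 := by
  simp only [List.mem_cons, List.mem_filterMap]
  refine or_congr Iff.rfl ?_
  constructor
  · rintro ⟨p, hp, hif⟩
    rw [PySem.List.mem_enumerate_iff] at hp
    obtain ⟨k, hk, rfl⟩ := hp
    split_ifs at hif with hc
    · refine ⟨k, hk, ?_, by simpa using hif.symm⟩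
      rw [List.getD_eq_getElem h ' ' hk]
      exact (pvNL h[k]).mp (by simpa using hc)
  · rintro ⟨k, hk, hnl, rfl⟩
    refine ⟨((k : Int), h[k]), ?_, ?_⟩
    · rw [PySem.List.mem_enumerate_iff]
      exact ⟨k, hk, by simp⟩
    · rw [if_pos ((pvNL h[k]).mpr (by rwa [List.getD_eq_getElem h ' ' hk] at hnl))]

theorem pvAlt_iff (h n : List Char) :
    ((0 :: ((PySem.List.enumerate h).filterMap fun p =>
        if !(decide ('a' ≤ p.2) && decide (p.2 ≤ 'z')) then some (p.1 + 1) else none)).any fun i =>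
      PySem.Chars.startswith (h.drop i.toNat) n && pvRightB h (n.length : Int) i) = true ↔ pvE h n 0 := by
  rw [List.any_eq_true]
  constructor
  · rintro ⟨i, hmem, hp⟩
    rw [pvMem_starts] at hmem
    rw [Bool.and_eq_true, PySem.Chars.startswith_iff] at hp
    obtain ⟨hpfx, hr⟩ := hp
    have h0i : 0 ≤ i := by
      rcases hmem with rfl | ⟨k, _, _, rfl⟩ <;> omega
    have hi : ((i.toNat : Nat) : Int) = i := Int.toNat_of_nonneg h0i
    have hlen : i.toNat + n.length ≤ h.length := by
      have := hpfx.length_le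
      rw [List.length_drop] at this
      rcases Nat.le_total i.toNat h.length with hle | hge
      · omega
      · -- i.toNat ≥ h.length: drop is [], so n = [] and the bound still holds
        have hd : h.drop i.toNat = [] := List.drop_eq_nil_of_le hge
        rw [hd] at hpfx
        have : n = [] := List.prefix_nil.mp hpfx
        subst this
        -- i is 0 or k+1 with k < h.length, so i.toNat ≤ h.length
        rcases hmem with rfl | ⟨k, hk, _, rfl⟩ <;> simp_all
    refine ⟨i.toNat, Nat.zero_le _, hlen, hpfx, ?_, ?_⟩
    · -- left boundary from candidate membership
      rcases hmem with rfl | ⟨k, hk, hnl, rfl⟩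
      · exact Or.inl rfl
      · refine Or.inr ?_
        have : ((k : Int) + 1).toNat = k + 1 := by omega
        rw [this]
        simpa using hnl
    · have hiff := pvRightB_iff h n.length i.toNat
      rw [hi] at hiff
      exact hiff.mp hr
  · rintro ⟨i, -, him, hpfx, hokL, hokR⟩
    refine ⟨(i : Int), ?_, ?_⟩
    · rw [pvMem_starts]
      rcases Nat.eq_zero_or_pos i with rfl | hi0
      · exact Or.inl rfl
      · rcases hokL with h0 | hnl
        · omega
        · exact Or.inr ⟨i - 1, by omega, hnl, by omega⟩
    · rw [Bool.and_eq_true, PySem.Chars.startswith_iff, Int.toNat_natCast]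
      exact ⟨hpfx, (pvRightB_iff h n.length i).mpr hokR⟩

theorem pvLexSingle (c d : Char) : ([c] < [d]) ↔ c < d := by
  constructor
  · intro h
    cases h with
    | cons h => exact absurd h (by intro h; cases h)
    | rel h => exact h
  · intro h; exact List.Lex.rel h

theorem pvTestOne (c : Char) : pvTest [c] = true ↔ ¬('a' ≤ c ∧ c ≤ 'z') := by
  simp [pvTest, pvLexSingle, pvCharTri, not_and, not_le]

theorem pvTestSpace : pvTest [' '] = true := by decide

theorem pvSliceOne (h : List Char) (k : Nat) (hk : k < h.length) :
    PySem.List.slice h (some (k : Int)) (some ((k : Int) + 1)) = [h.getD k ' '] := by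
  rw [PySem.List.slice_toNat _ (by positivity) (by positivity)]
  have e : ((k : Int) + 1).toNat - (k : Int).toNat = 1 := by omega
  rw [e, Int.toNat_natCast, List.drop_eq_getElem_cons hk, List.take_succ_cons,
    List.take_zero, List.getD_eq_getElem h ' ' hk]

theorem pvCondA_iff (h n : List Char) (j : Nat) (hj : j + n.length ≤ h.length) :
    pvCondA h n (j : Int) = true ↔ pvOk h n.length j := by
  unfold pvCondA pvOk
  rw [Bool.and_eq_true]
  refine and_congr ?_ ?_
  · rcases Nat.eq_zero_or_pos j with h0 | h0
    · subst h0
      rw [if_neg (by omega)]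
      simp [pvTestSpace]
    · have b1 : ((j : Int) - 1) = ((j - 1 : Nat) : Int) := by omega
      rw [if_pos (by omega), b1,
        show (some (j : Int)) = some (((j - 1 : Nat) : Int) + 1) by rw [Option.some_inj]; omega,
        pvSliceOne h (j - 1) (by omega), pvTestOne]
      simp [Nat.pos_iff_ne_zero.mp h0]
  · by_cases hc : (j : Int) + (n.length : Int) < (h.length : Int)
    · have a1 : ((j : Int) + (n.length : Int)) = ((j + n.length : Nat) : Int) := by omega
      rw [if_pos hc, a1, pvSliceOne h (j + n.length) (by omega), pvTestOne]
      simp [show ¬ h.length ≤ j + n.length by omega]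
    · rw [if_neg hc]
      simp [pvTestSpace, show h.length ≤ j + n.length by omega]

-- CPython: str.find(sub, start) with start past len(s) is -1 (no named PySem lemma covers it)
theorem pvFindFrom_past (s sub : List Char) (k : Int) (h1 : (s.length : Int) < k) :
    PySem.Chars.findFrom s sub k none = -1 := by
  simp [PySem.Chars.findFrom]
  split_ifs <;> omega

theorem pvInfix_of_prefix_drop {n h : List Char} {i k : Nat} (hk : k ≤ i)
    (hp : n <+: h.drop i) : n <:+: h.drop k := by
  have e : h.drop i = (h.drop k).drop (i - k) := by
    rw [List.drop_drop]; congr 1; omega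
  rw [e] at hp
  exact hp.isInfix.trans (List.drop_suffix _ _).isInfix

theorem pvLoopA_spec (h n : List Char) (fuel start : Nat)
    (hs : start ≤ h.length) (hf : h.length + 1 ≤ fuel + start) :
    (pvLoopA h n fuel (PySem.Chars.findFrom h n (start : Int) none) = true ↔ pvE h n start) := by
  induction fuel generalizing start with
  | zero => omega
  | succ f ih =>
    by_cases hneg : PySem.Chars.findFrom h n (start : Int) none = -1
    · rw [hneg]
      have hno : ¬ n <:+: h.drop start :=
        (PySem.Chars.findFrom_natCast_eq_neg_one_iff h n start hs).mp hneg
      constructor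
      · intro hc; simp [pvLoopA] at hc
      · rintro ⟨i, hsi, -, hp, -⟩
        exact absurd (pvInfix_of_prefix_drop hsi hp) hno
    · obtain ⟨hle, hpfx, hmin⟩ := PySem.Chars.findFrom_natCast_spec h n start hs hneg
      set j := PySem.Chars.findFrom h n (start : Int) none with hjdef
      have hj0 : (0 : Int) ≤ j := le_trans (by positivity) hle
      have hjlen : j ≤ (h.length : Int) := by
        rw [hjdef, PySem.Chars.findFrom_natCast h n start hs]
        split_ifs with hr
        · omega
        · have h2 : PySem.Chars.find (h.drop start) n ≤ ((h.drop start).length : Int) :=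
            PySem.Chars.find_le_length _ _
          rw [List.length_drop] at h2
          omega
      have hjcast : ((j.toNat : Nat) : Int) = j := Int.toNat_of_nonneg hj0
      have hjm : j.toNat + n.length ≤ h.length := by
        have h3 := hpfx.length_le
        rw [List.length_drop] at h3
        omega
      have hsj : start ≤ j.toNat := by omega
      rw [show pvLoopA h n (f + 1) j =
        (if 0 ≤ j then
          if pvCondA h n j then true
          else pvLoopA h n f (PySem.Chars.findFrom h n (j + 1) none)
        else false) from rfl]
      rw [if_pos hj0]
      have hcondiff := pvCondA_iff h n j.toNat hjm
      rw [hjcast] at hcondiff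
      by_cases hcond : pvCondA h n j = true
      · rw [if_pos hcond]
        simp only [true_iff]
        exact ⟨j.toNat, hsj, hjm, hpfx, hcondiff.mp hcond⟩
      · rw [if_neg hcond]
        have hnokj : ¬ pvOk h n.length j.toNat := fun hk => hcond (hcondiff.mpr hk)
        by_cases hend : j.toNat + 1 ≤ h.length
        · rw [show j + 1 = ((j.toNat + 1 : Nat) : Int) by omega]
          rw [ih (j.toNat + 1) hend (by omega)]
          constructor
          · rintro ⟨i, hsi, him, hp, hok⟩
            exact ⟨i, by omega, him, hp, hok⟩
          · rintro ⟨i, hsi, him, hp, hok⟩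
            rcases Nat.lt_or_ge i (j.toNat + 1) with hlt | hge
            · rcases Nat.lt_or_ge i j.toNat with hlt2 | hge2
              · exact absurd hp (hmin i hsi hlt2)
              · have hi : i = j.toNat := by omega
                subst hi
                exact absurd hok hnokj
            · exact ⟨i, hge, him, hp, hok⟩
        · rw [show j + 1 = ((h.length : Int) + 1) by omega]
          rw [pvFindFrom_past h n _ (by omega)]
          have hfalse : pvLoopA h n f (-1) = false := by
            cases f <;> simp [pvLoopA]
          rw [hfalse]
          simp only [Bool.false_eq_true, false_iff]
          rintro ⟨i, hsi, him, hp, hok⟩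
          rcases Nat.lt_or_ge i j.toNat with hlt2 | hge2
          · exact absurd hp (hmin i hsi hlt2)
          · have hi : i = j.toNat := by omega
            subst hi
            exact absurd hok hnokj

-- ===== VERDICT (by name: the statement is the Claim_ definition above) =====
theorem findNeedle_spec : Claim_equal_findNeedle := by
  intro needle hayStack _
  unfold Spec_findNeedle findNeedle findNeedle_alt
  set h := PySem.Chars.lower (PySem.Chars.strip hayStack.toList) with hh
  set n := PySem.Chars.lower needle.toList with hn
  show pvLoopA h n (h.length + 1) (PySem.Chars.find h n) =
      ((0 :: ((PySem.List.enumerate h).filterMap fun p =>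
          if !(decide ('a' ≤ p.2) && decide (p.2 ≤ 'z')) then some (p.1 + 1) else none)).any fun i =>
        PySem.Chars.startswith (h.drop i.toNat) n && pvRightB h (n.length : Int) i)
  rw [Bool.eq_iff_iff]
  rw [← PySem.Chars.findFrom_zero h n]
  rw [show (0 : Int) = ((0 : Nat) : Int) by norm_num]
  rw [pvLoopA_spec h n (h.length + 1) 0 (by omega) (by omega)]
  simpa using (pvAlt_iff h n).symm
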